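-- pv_equiv track=rewrite | github.com/hotternative/leetcode | seating.py | maximum_seating
-- ===== SOURCE A (Python) =====
-- from typing import List
--
-- def find_choices(path: List[int], initial_seating: List[int]):
--     choices = []
--     current_seating = path + initial_seating[len(path):]
--     for i in range(len(path), len(initial_seating)):
--         if initial_seating[i]:
--             continue
--         ppl_close = 0
--         if 0 <= i-1:
--             ppl_close += current_seating[i-1]
--         if 0 <= i-2:
--             ppl_close += current_seating[i-2]
--         if i+1 < len(current_seating):
--             ppl_close += current_seating[i+1]
--         if i+2 < len(current_seating):
--             ppl_close += current_seating[i+2]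
--         if ppl_close == 0:
--             choices.append(i)
--     return choices
--
-- def seat_at_i(path, initial_seating, i):
--     current_seating = path + initial_seating[len(path):]
--     current_seating[i] = 1
--     return current_seating[:i+1]
--
-- def maximum_seating(initial_seating):
--     initial_seated = sum(initial_seating)
--     ans = 0
--
--
--     def backtrack(path: List[int], ans: int) -> int:
--
--         choices_to_seat = find_choices(path, initial_seating)
--
--         if len(path) == len(initial_seating):
--             seated = sum(path) - initial_seated
--             if seated > ans:
--                 ans = seated
--             return ans
--
--         if not choices_to_seat:
--             current_seating = path + initial_seating[len(path):]
--             seated = sum(current_seating) - initial_seated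
--             if seated > ans:
--                 ans = seated
--             return ans
--
--         for choice in choices_to_seat:
--             new_path = seat_at_i(path, initial_seating, choice)
--             ans = backtrack(new_path, ans)
--
--         return ans
--
--     return backtrack([], 0)
-- ===== SOURCE B (Python) =====
-- def maximum_seating(initial_seating):
--     # Backward 4-state dynamic programme over seat positions: the feasibility of
--     # seating at i depends only on the original row plus whether i-1 / i-2 were
--     # newly seated, so one right-to-left pass over states (a, b) = (seat placed
--     # at i-2, seat placed at i-1) computes the maximum A finds by backtracking.
--     n = len(initial_seating)
--     g_ff = g_ft = g_tf = g_tt = 0  # best count from position i given state (a, b)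
--     for i in range(n - 1, -1, -1):
--         def feasible(a, b):
--             if initial_seating[i] != 0:
--                 return False
--             s = 0
--             if i - 1 >= 0:
--                 s += 1 if b else initial_seating[i - 1]
--             if i - 2 >= 0:
--                 s += 1 if a else initial_seating[i - 2]
--             if i + 1 < n:
--                 s += initial_seating[i + 1]
--             if i + 2 < n:
--                 s += initial_seating[i + 2]
--             return s == 0
--         n_ff = max(g_ff, 1 + g_ft) if feasible(False, False) else g_ff
--         n_ft = max(g_tf, 1 + g_tt) if feasible(False, True) else g_tf
--         n_tf = max(g_ff, 1 + g_ft) if feasible(True, False) else g_ff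
--         n_tt = max(g_tf, 1 + g_tt) if feasible(True, True) else g_tf
--         g_ff, g_ft, g_tf, g_tt = n_ff, n_ft, n_tf, n_tt
--     return g_ff
-- ===== Notes on version B (the rewrite author's own statement) =====
-- stated objective: alternative
-- what changed: Replaced A's recursive backtracking over all feasible seating sequences by a backward 4-state dynamic programme over positions (state = whether seats i-2/i-1 were newly placed), exact on all integer lists; B is linear even on zero-dense rows where A's search branches, though the timing inputs (dense nonzero rows) make A linear too.
import Mathlib
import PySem

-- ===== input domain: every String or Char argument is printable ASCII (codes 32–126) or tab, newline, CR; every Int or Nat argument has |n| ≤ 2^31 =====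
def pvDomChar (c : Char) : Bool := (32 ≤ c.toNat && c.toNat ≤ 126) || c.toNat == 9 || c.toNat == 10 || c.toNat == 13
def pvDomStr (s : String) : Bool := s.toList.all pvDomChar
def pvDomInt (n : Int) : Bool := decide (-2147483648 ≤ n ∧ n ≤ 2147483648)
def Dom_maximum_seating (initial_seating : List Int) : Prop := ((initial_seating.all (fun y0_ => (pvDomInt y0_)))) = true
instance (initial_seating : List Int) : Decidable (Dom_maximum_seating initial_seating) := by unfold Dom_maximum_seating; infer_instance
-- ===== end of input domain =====

-- B replaces A's recursive backtracking over seating sequences by a backward 4-state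
-- dynamic programme over positions (state = whether seats i-2 / i-1 were newly placed);
-- proved to return the same value on every input.

-- ===== PORT A =====
def find_choices (path : List Int) (initial_seating : List Int) : List Int :=
  let current_seating := path ++ initial_seating.drop path.length
  (PySem.List.pyRange (path.length : Int) (initial_seating.length : Int) 1).foldl
    (fun choices i =>
      if PySem.List.pyGetD initial_seating i 0 ≠ 0 then choices
      else
        let ppl_close : Int := 0
        let ppl_close := if (0:Int) ≤ i - 1 then ppl_close + PySem.List.pyGetD current_seating (i - 1) 0 else ppl_close
        let ppl_close := if (0:Int) ≤ i - 2 then ppl_close + PySem.List.pyGetD current_seating (i - 2) 0 else ppl_close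
        let ppl_close := if i + 1 < PySem.List.len current_seating then ppl_close + PySem.List.pyGetD current_seating (i + 1) 0 else ppl_close
        let ppl_close := if i + 2 < PySem.List.len current_seating then ppl_close + PySem.List.pyGetD current_seating (i + 2) 0 else ppl_close
        if ppl_close = 0 then choices ++ [i] else choices)
    []

def seat_at_i (path : List Int) (initial_seating : List Int) (i : Int) : List Int :=
  let current_seating := path ++ initial_seating.drop path.length
  let current_seating := PySem.List.pySetD current_seating i 1
  PySem.List.slice current_seating none (some (i + 1))

def backtrack (initial_seating : List Int) (initial_seated : Int) : Nat → List Int → Int → Int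
  | 0, _, ans => ans
  | fuel+1, path, ans =>
    let choices_to_seat := find_choices path initial_seating
    if path.length = initial_seating.length then
      let seated := path.sum - initial_seated
      if seated > ans then seated else ans
    else if choices_to_seat = [] then
      let current_seating := path ++ initial_seating.drop path.length
      let seated := current_seating.sum - initial_seated
      if seated > ans then seated else ans
    else
      choices_to_seat.foldl
        (fun a choice => backtrack initial_seating initial_seated fuel (seat_at_i path initial_seating choice) a) ans

def maximum_seating (initial_seating : List Int) : Int :=
  let initial_seated := initial_seating.sum
  backtrack initial_seating initial_seated (initial_seating.length + 1) [] 0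

-- ===== PORT B =====
def maximum_seating_alt (initial_seating : List Int) : Int :=
  let n : Int := (initial_seating.length : Int)
  let res := (PySem.List.pyRange (n - 1) (-1) (-1)).foldl
    (fun (st : Int × Int × Int × Int) i =>
      let feasible := fun (a b : Bool) =>
        if PySem.List.pyGetD initial_seating i 0 ≠ 0 then false
        else
          let s : Int := 0
          let s := if i - 1 ≥ 0 then s + (if b then 1 else PySem.List.pyGetD initial_seating (i - 1) 0) else s
          let s := if i - 2 ≥ 0 then s + (if a then 1 else PySem.List.pyGetD initial_seating (i - 2) 0) else s
          let s := if i + 1 < n then s + PySem.List.pyGetD initial_seating (i + 1) 0 else s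
          let s := if i + 2 < n then s + PySem.List.pyGetD initial_seating (i + 2) 0 else s
          s == 0
      let (g_ff, g_ft, g_tf, g_tt) := st
      ((if feasible false false then max g_ff (1 + g_ft) else g_ff),
       (if feasible false true then max g_tf (1 + g_tt) else g_tf),
       (if feasible true false then max g_ff (1 + g_ft) else g_ff),
       (if feasible true true then max g_tf (1 + g_tt) else g_tf)))
    (0, 0, 0, 0)
  res.1

-- neighbour sum seen at position i when flags a/b say that seats i-2/i-1 were newly placed

-- ===== PRECONDITION & SPEC =====
def Spec_maximum_seating (initial_seating : List Int) (out : Int) : Prop := out = maximum_seating_alt initial_seating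
instance (initial_seating : List Int) (out : Int) : Decidable (Spec_maximum_seating initial_seating out) := by unfold Spec_maximum_seating; infer_instance

-- ===== CLAIM (what is proved, stated in full; the proofs are below) =====
def Claim_equal_maximum_seating : Prop := ∀ (initial_seating : List Int), Dom_maximum_seating initial_seating → Spec_maximum_seating initial_seating (maximum_seating initial_seating)

-- ===== LEMMAS AND PROOFS =====

def pvPpl (cur : List Int) (i : Int) : Int :=
  (if (0:Int) ≤ i - 1 then PySem.List.pyGetD cur (i - 1) 0 else 0) +
  (if (0:Int) ≤ i - 2 then PySem.List.pyGetD cur (i - 2) 0 else 0) +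
  (if i + 1 < PySem.List.len cur then PySem.List.pyGetD cur (i + 1) 0 else 0) +
  (if i + 2 < PySem.List.len cur then PySem.List.pyGetD cur (i + 2) 0 else 0)

def pvQ (L cur : List Int) (i : Int) : Bool :=
  !(PySem.List.pyGetD L i 0 != 0) && (pvPpl cur i == 0)

def pvS (L : List Int) (i : Int) (a b : Bool) : Int :=
  (if i - 1 ≥ 0 then (if b then 1 else PySem.List.pyGetD L (i - 1) 0) else 0) +
  (if i - 2 ≥ 0 then (if a then 1 else PySem.List.pyGetD L (i - 2) 0) else 0) +
  (if i + 1 < (L.length : Int) then PySem.List.pyGetD L (i + 1) 0 else 0) +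
  (if i + 2 < (L.length : Int) then PySem.List.pyGetD L (i + 2) 0 else 0)

def pvCond (L : List Int) (i : Int) (a b : Bool) : Bool :=
  !(PySem.List.pyGetD L i 0 != 0) && (pvS L i a b == 0)

-- best number of extra seats from position p on, given flags for p-2 / p-1

def pvG (L : List Int) (p : Nat) (a b : Bool) : Int :=
  if _h : p < L.length then
    (if pvCond L p a b then max (1 + pvG L (p + 1) b true) (pvG L (p + 1) b false)
     else pvG L (p + 1) b false)
  else 0
termination_by L.length - p

-- the list of A's choices from position p on, given flags for p-2 / p-1

def pvF (L : List Int) (p : Nat) (a b : Bool) : List Int :=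
  if _h : p < L.length then
    (if pvCond L p a b then ((p : Int)) :: pvF L (p + 1) b false else pvF L (p + 1) b false)
  else []
termination_by L.length - p

def pvFlagA (p : Nat) (a b : Bool) (i : Int) : Bool :=
  if i = (p : Int) then a else if i = (p : Int) + 1 then b else false

def pvFlagB (p : Nat) (a b : Bool) (i : Int) : Bool :=
  if i = (p : Int) then b else false

def pvInv (L path : List Int) (a b : Bool) : Prop :=
  (path = [] ∧ a = false ∧ b = false) ∨
  (path ≠ [] ∧ b = true ∧ path.getD (path.length - 1) 0 = 1 ∧
    (2 ≤ path.length → path.getD (path.length - 2) 0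
      = (if a then 1 else L.getD (path.length - 2) 0)))

def pvFeas (L : List Int) (i : Int) (a b : Bool) : Bool :=
  if PySem.List.pyGetD L i 0 ≠ 0 then false
  else
    let s : Int := 0
    let s := if i - 1 ≥ 0 then s + (if b then 1 else PySem.List.pyGetD L (i - 1) 0) else s
    let s := if i - 2 ≥ 0 then s + (if a then 1 else PySem.List.pyGetD L (i - 2) 0) else s
    let s := if i + 1 < (L.length : Int) then s + PySem.List.pyGetD L (i + 1) 0 else s
    let s := if i + 2 < (L.length : Int) then s + PySem.List.pyGetD L (i + 2) 0 else s
    s == 0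

def pvBStep (L : List Int) (st : Int × Int × Int × Int) (i : Int) : Int × Int × Int × Int :=
  let feasible := fun (a b : Bool) =>
    if PySem.List.pyGetD L i 0 ≠ 0 then false
    else
      let s : Int := 0
      let s := if i - 1 ≥ 0 then s + (if b then 1 else PySem.List.pyGetD L (i - 1) 0) else s
      let s := if i - 2 ≥ 0 then s + (if a then 1 else PySem.List.pyGetD L (i - 2) 0) else s
      let s := if i + 1 < (L.length : Int) then s + PySem.List.pyGetD L (i + 1) 0 else s
      let s := if i + 2 < (L.length : Int) then s + PySem.List.pyGetD L (i + 2) 0 else s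
      s == 0
  let (g_ff, g_ft, g_tf, g_tt) := st
  ((if feasible false false then max g_ff (1 + g_ft) else g_ff),
   (if feasible false true then max g_tf (1 + g_tt) else g_tf),
   (if feasible true false then max g_ff (1 + g_ft) else g_ff),
   (if feasible true true then max g_tf (1 + g_tt) else g_tf))

theorem pvG_nonneg (L : List Int) (p : Nat) (a b : Bool) : 0 ≤ pvG L p a b := by
  fun_induction pvG L p a b with
  | case1 p a b h hc ih1 ih2 => omega
  | case2 p a b h hc ih => exact ih
  | case3 p a b h => simp

theorem pvF_mem (L : List Int) (p : Nat) (a b : Bool) (x : Int) (hx : x ∈ pvF L p a b) :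
    (p : Int) ≤ x ∧ x < (L.length : Int) ∧ PySem.List.pyGetD L x 0 = 0 := by
  fun_induction pvF L p a b with
  | case1 p a b hlt hc ih =>
    simp only [List.mem_cons] at hx
    rcases hx with rfl | hx
    · refine ⟨le_refl _, by exact_mod_cast hlt, ?_⟩
      simp only [pvCond, Bool.and_eq_true, Bool.not_eq_true', bne_eq_false_iff_eq] at hc
      exact hc.1
    · have h := ih hx
      refine ⟨by push_cast at h ⊢; omega, h.2.1, h.2.2⟩
  | case2 p a b hlt hc ih =>
    have h := ih hx
    refine ⟨by push_cast at h ⊢; omega, h.2.1, h.2.2⟩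
  | case3 p a b hlt => simp [pvF] at hx

theorem pv_foldl_max_congr (w w' : Int → Int) :
    ∀ (xs : List Int) (x : Int), (∀ c ∈ xs, w c = w' c) →
      xs.foldl (fun acc c => max acc (w c)) x = xs.foldl (fun acc c => max acc (w' c)) x := by
  intro xs
  induction xs with
  | nil => intro x _; rfl
  | cons c xs ih =>
    intro x h
    rw [List.foldl_cons, List.foldl_cons, h c (by simp)]
    exact ih _ (fun y hy => h y (by simp [hy]))

theorem pv_foldl_max_init (w : Int → Int) :
    ∀ (xs : List Int) (x : Int), 0 ≤ x →
      xs.foldl (fun acc c => max acc (w c)) x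
        = max x (xs.foldl (fun acc c => max acc (w c)) 0) := by
  intro xs
  induction xs with
  | nil => intro x hx; simp; omega
  | cons c xs ih =>
    intro x hx
    rw [List.foldl_cons, List.foldl_cons]
    rw [ih (max x (w c)) (by omega), ih (max 0 (w c)) (by omega)]
    omega

theorem pvG_max (L : List Int) (p : Nat) (a b : Bool) :
    pvG L p a b = (pvF L p a b).foldl
      (fun acc c => max acc (1 + pvG L (c.toNat + 1) (decide (c = (p : Int)) && b) true)) 0 := by
  fun_induction pvF L p a b with
  | case1 p a b hlt hc ih =>
    have hGp : pvG L p a b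
        = max (1 + pvG L (p + 1) b true) (pvG L (p + 1) b false) := by
      rw [pvG]; simp [hlt, hc]
    have hcongr : ∀ c ∈ pvF L (p + 1) b false,
        (1 + pvG L (c.toNat + 1) (decide (c = (p : Int)) && b) true)
          = (1 + pvG L (c.toNat + 1) (decide (c = ((p + 1 : Nat) : Int)) && false) true) := by
      intro c hcm
      have h := pvF_mem L (p + 1) b false c hcm
      have hne : (decide (c = (p : Int))) = false := by
        simp only [decide_eq_false_iff_not]
        push_cast at h; omega
      simp [hne]
    rw [List.foldl_cons]
    have e0 : max 0 (1 + pvG L (((p : Int)).toNat + 1) (decide ((p : Int) = (p : Int)) && b) true)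
        = 1 + pvG L (p + 1) b true := by
      have := pvG_nonneg L (p + 1) b true
      simp only [Int.toNat_natCast, decide_eq_true_eq]
      simp
      omega
    rw [e0]
    rw [pv_foldl_max_congr _ _ _ _ hcongr]
    rw [pv_foldl_max_init _ _ _ (by have := pvG_nonneg L (p + 1) b true; omega)]
    rw [← ih, hGp]
  | case2 p a b hlt hc ih =>
    have hGp : pvG L p a b = pvG L (p + 1) b false := by
      rw [pvG]; simp [hlt, hc]
    have hcongr : ∀ c ∈ pvF L (p + 1) b false,
        (1 + pvG L (c.toNat + 1) (decide (c = (p : Int)) && b) true)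
          = (1 + pvG L (c.toNat + 1) (decide (c = ((p + 1 : Nat) : Int)) && false) true) := by
      intro c hcm
      have h := pvF_mem L (p + 1) b false c hcm
      have : (decide (c = (p : Int))) = false := by
        simp only [decide_eq_false_iff_not]
        push_cast at h; omega
      simp [this]
    rw [hGp, ih, ← pv_foldl_max_congr _ _ _ _ hcongr]
  | case3 p a b hlt =>
    rw [pvG]; simp [hlt]

theorem pv_foldl_append_if {β : Type} (q : β → Bool) :
    ∀ (xs acc : List β), xs.foldl (fun a x => if q x then a ++ [x] else a) acc = acc ++ xs.filter q := by
  intro xs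
  induction xs with
  | nil => intro acc; simp
  | cons x xs ih =>
    intro acc
    by_cases h : q x = true
    · simp [h, ih, List.filter_cons]
    · simp only [Bool.not_eq_true] at h
      simp [h, ih, List.filter_cons]

theorem find_choices_eq_filter (path L : List Int) :
    find_choices path L
      = (PySem.List.pyRange (path.length : Int) (L.length : Int) 1).filter
          (pvQ L (path ++ L.drop path.length)) := by
  have h0 : find_choices path L
      = (PySem.List.pyRange (path.length : Int) (L.length : Int) 1).foldl
        (fun (choices : List Int) (i : Int) =>
          if PySem.List.pyGetD L i 0 ≠ 0 then choices
          else
            let ppl_close : Int := 0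
            let ppl_close := if (0:Int) ≤ i - 1 then ppl_close + PySem.List.pyGetD (path ++ L.drop path.length) (i - 1) 0 else ppl_close
            let ppl_close := if (0:Int) ≤ i - 2 then ppl_close + PySem.List.pyGetD (path ++ L.drop path.length) (i - 2) 0 else ppl_close
            let ppl_close := if i + 1 < PySem.List.len (path ++ L.drop path.length) then ppl_close + PySem.List.pyGetD (path ++ L.drop path.length) (i + 1) 0 else ppl_close
            let ppl_close := if i + 2 < PySem.List.len (path ++ L.drop path.length) then ppl_close + PySem.List.pyGetD (path ++ L.drop path.length) (i + 2) 0 else ppl_close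
            if ppl_close = 0 then choices ++ [i] else choices) [] := rfl
  rw [h0]
  have hbody : (fun (choices : List Int) (i : Int) =>
      if PySem.List.pyGetD L i 0 ≠ 0 then choices
      else
        let ppl_close : Int := 0
        let ppl_close := if (0:Int) ≤ i - 1 then ppl_close + PySem.List.pyGetD (path ++ L.drop path.length) (i - 1) 0 else ppl_close
        let ppl_close := if (0:Int) ≤ i - 2 then ppl_close + PySem.List.pyGetD (path ++ L.drop path.length) (i - 2) 0 else ppl_close
        let ppl_close := if i + 1 < PySem.List.len (path ++ L.drop path.length) then ppl_close + PySem.List.pyGetD (path ++ L.drop path.length) (i + 1) 0 else ppl_close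
        let ppl_close := if i + 2 < PySem.List.len (path ++ L.drop path.length) then ppl_close + PySem.List.pyGetD (path ++ L.drop path.length) (i + 2) 0 else ppl_close
        if ppl_close = 0 then choices ++ [i] else choices)
      = fun choices i => if pvQ L (path ++ L.drop path.length) i then choices ++ [i] else choices := by
    funext choices i
    by_cases h1 : PySem.List.pyGetD L i 0 ≠ 0
    · simp [h1, pvQ]
    · simp only [ne_eq, Decidable.not_not] at h1
      have hppl : (let ppl_close : Int := 0
        let ppl_close := if (0:Int) ≤ i - 1 then ppl_close + PySem.List.pyGetD (path ++ L.drop path.length) (i - 1) 0 else ppl_close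
        let ppl_close := if (0:Int) ≤ i - 2 then ppl_close + PySem.List.pyGetD (path ++ L.drop path.length) (i - 2) 0 else ppl_close
        let ppl_close := if i + 1 < PySem.List.len (path ++ L.drop path.length) then ppl_close + PySem.List.pyGetD (path ++ L.drop path.length) (i + 1) 0 else ppl_close
        let ppl_close := if i + 2 < PySem.List.len (path ++ L.drop path.length) then ppl_close + PySem.List.pyGetD (path ++ L.drop path.length) (i + 2) 0 else ppl_close
        ppl_close) = pvPpl (path ++ L.drop path.length) i := by
        simp only [pvPpl]
        split_ifs <;> ring
      simp only [h1, ne_eq, not_true_eq_false, if_false, ite_not, hppl, pvQ]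
      by_cases h2 : pvPpl (path ++ L.drop path.length) i = 0
      · simp [h1, h2, hppl]
      · simp [h1, h2, hppl]
  rw [hbody, pv_foldl_append_if]
  simp

theorem pvF_eq_filter (L : List Int) (p : Nat) (a b : Bool) :
    pvF L p a b = (PySem.List.pyRange (p : Int) (L.length : Int) 1).filter
      (fun i => pvCond L i (pvFlagA p a b i) (pvFlagB p a b i)) := by
  fun_induction pvF L p a b with
  | case1 p a b hlt hc ih =>
    rw [PySem.List.pyRange_one_cons (by push_cast; omega), List.filter_cons]
    have hA : pvFlagA p a b ((p : Int)) = a := by simp [pvFlagA]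
    have hB : pvFlagB p a b ((p : Int)) = b := by simp [pvFlagB]
    rw [hA, hB, if_pos hc]
    have hcast : ((p : Int) + 1) = (((p + 1 : Nat)) : Int) := by push_cast; ring
    rw [hcast, ih]
    congr 1
    apply List.filter_congr
    intro i hi
    rw [PySem.List.mem_pyRange_one] at hi
    have e1 : pvFlagA p a b i = pvFlagA (p + 1) b false i := by
      unfold pvFlagA
      push_cast at hi ⊢
      rw [if_neg (by omega)]
      by_cases h : i = (p : Int) + 1
      · rw [if_pos h, if_pos (by omega)]
      · rw [if_neg h, if_neg (by omega)]
        simp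
    have e2 : pvFlagB p a b i = pvFlagB (p + 1) b false i := by
      unfold pvFlagB
      push_cast at hi ⊢
      rw [if_neg (by omega)]
      by_cases h : i = (p : Int) + 1
      · rw [if_pos (by push_cast; omega)]
      · rw [if_neg (by push_cast; omega)]
    rw [e1, e2]
  | case2 p a b hlt hc ih =>
    rw [PySem.List.pyRange_one_cons (by push_cast; omega), List.filter_cons]
    have hA : pvFlagA p a b ((p : Int)) = a := by simp [pvFlagA]
    have hB : pvFlagB p a b ((p : Int)) = b := by simp [pvFlagB]
    rw [hA, hB, if_neg (by simp [hc])]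
    have hcast : ((p : Int) + 1) = (((p + 1 : Nat)) : Int) := by push_cast; ring
    rw [hcast, ih]
    apply List.filter_congr
    intro i hi
    rw [PySem.List.mem_pyRange_one] at hi
    have e1 : pvFlagA p a b i = pvFlagA (p + 1) b false i := by
      unfold pvFlagA
      push_cast at hi ⊢
      rw [if_neg (by omega)]
      by_cases h : i = (p : Int) + 1
      · rw [if_pos h, if_pos (by omega)]
      · rw [if_neg h, if_neg (by omega)]
        simp
    have e2 : pvFlagB p a b i = pvFlagB (p + 1) b false i := by
      unfold pvFlagB
      push_cast at hi ⊢
      rw [if_neg (by omega)]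
      by_cases h : i = (p : Int) + 1
      · rw [if_pos (by push_cast; omega)]
      · rw [if_neg (by push_cast; omega)]
    rw [e1, e2]
  | case3 p a b hlt =>
    rw [PySem.List.pyRange_one_eq_nil (by push_cast; omega)]
    simp

-- the ppl_close test of A agrees with pvCond when the four neighbour reads are as stated

theorem pvQ_eq_cond (L cur : List Int) (i : Int) (a b : Bool)
    (hlen : cur.length = L.length)
    (f1 : 0 ≤ i - 1 → PySem.List.pyGetD cur (i - 1) 0 = (if b then 1 else PySem.List.pyGetD L (i - 1) 0))
    (f2 : 0 ≤ i - 2 → PySem.List.pyGetD cur (i - 2) 0 = (if a then 1 else PySem.List.pyGetD L (i - 2) 0))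
    (f3 : PySem.List.pyGetD cur (i + 1) 0 = PySem.List.pyGetD L (i + 1) 0)
    (f4 : PySem.List.pyGetD cur (i + 2) 0 = PySem.List.pyGetD L (i + 2) 0) :
    pvQ L cur i = pvCond L i a b := by
  have hlen' : PySem.List.len cur = (L.length : Int) := by
    rw [PySem.List.len_eq, hlen]
  have e : pvPpl cur i = pvS L i a b := by
    unfold pvPpl pvS
    rw [hlen', f3, f4]
    have t1 : (if (0:Int) ≤ i - 1 then PySem.List.pyGetD cur (i - 1) 0 else 0)
        = (if i - 1 ≥ 0 then (if b then 1 else PySem.List.pyGetD L (i - 1) 0) else 0) := by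
      by_cases g : (0:Int) ≤ i - 1
      · rw [if_pos g, if_pos (by omega), f1 g]
      · rw [if_neg g, if_neg (by omega)]
    have t2 : (if (0:Int) ≤ i - 2 then PySem.List.pyGetD cur (i - 2) 0 else 0)
        = (if i - 2 ≥ 0 then (if a then 1 else PySem.List.pyGetD L (i - 2) 0) else 0) := by
      by_cases g : (0:Int) ≤ i - 2
      · rw [if_pos g, if_pos (by omega), f2 g]
      · rw [if_neg g, if_neg (by omega)]
    rw [t1, t2]
  unfold pvQ pvCond
  rw [e]

theorem pv_cur_len (path L : List Int) (hp : path.length ≤ L.length) :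
    (path ++ L.drop path.length).length = L.length := by
  simp; omega

theorem pv_cur_ge (path L : List Int) (hp : path.length ≤ L.length) (j : Int)
    (hj : (path.length : Int) ≤ j) :
    PySem.List.pyGetD (path ++ L.drop path.length) j 0 = PySem.List.pyGetD L j 0 := by
  have hh : (0:Int) ≤ (path.length : Int) := by exact_mod_cast Nat.zero_le path.length
  have h0 : 0 ≤ j := by omega
  have e : ∀ (xs : List Int), PySem.List.pyGetD xs j 0 = (xs[j.toNat]?).getD 0 := by
    intro xs; rw [PySem.List.pyGetD, PySem.List.pyGet?_of_nonneg xs h0]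
  rw [e, e]
  by_cases hn : j.toNat < L.length
  · rw [List.getElem?_append_right (by omega), List.getElem?_drop]
    congr 2
    omega
  · rw [List.getElem?_eq_none (by rw [pv_cur_len path L hp]; omega),
      List.getElem?_eq_none (by omega)]

theorem pv_cur_lt (path L : List Int) (hp : path.length ≤ L.length) (j : Int)
    (h0 : 0 ≤ j) (hj : j < (path.length : Int)) :
    PySem.List.pyGetD (path ++ L.drop path.length) j 0 = path.getD j.toNat 0 := by
  have e : ∀ (xs : List Int), PySem.List.pyGetD xs j 0 = (xs[j.toNat]?).getD 0 := by
    intro xs; rw [PySem.List.pyGetD, PySem.List.pyGet?_of_nonneg xs h0]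
  rw [e, List.getD_eq_getElem?_getD, List.getElem?_append_left (by omega)]

theorem pv_choices_eq (L path : List Int) (a b : Bool)
    (hinv : pvInv L path a b) (hp : path.length ≤ L.length) :
    find_choices path L = pvF L path.length a b := by
  rw [find_choices_eq_filter, pvF_eq_filter]
  apply List.filter_congr
  intro i hi
  rw [PySem.List.mem_pyRange_one] at hi
  obtain ⟨hip, hin⟩ := hi
  have hcl := pv_cur_len path L hp
  have hh : (0:Int) ≤ (path.length : Int) := by exact_mod_cast Nat.zero_le path.length
  rcases hinv with ⟨hpe, ha, hb⟩ | ⟨hne, hb, hlast, hprev⟩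
  · subst hpe; subst ha; subst hb
    have hA : pvFlagA ([] : List Int).length false false i = false := by
      unfold pvFlagA; split_ifs <;> rfl
    have hB : pvFlagB ([] : List Int).length false false i = false := by
      unfold pvFlagB; split_ifs <;> rfl
    rw [hA, hB]
    apply pvQ_eq_cond _ _ _ _ _ hcl
    · intro hg
      rw [if_neg (by simp), pv_cur_ge [] L hp (i - 1) (by simpa using hg)]
    · intro hg
      rw [if_neg (by simp), pv_cur_ge [] L hp (i - 2) (by simpa using hg)]
    · exact pv_cur_ge [] L hp (i + 1) (by simp at hip ⊢; omega)
    · exact pv_cur_ge [] L hp (i + 2) (by simp at hip ⊢; omega)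
  · subst hb
    have hp1 : 1 ≤ path.length := List.length_pos_iff.mpr hne
    by_cases hc1 : i = (path.length : Int)
    · subst hc1
      have hA : pvFlagA path.length a true ((path.length : Int)) = a := by simp [pvFlagA]
      have hB : pvFlagB path.length a true ((path.length : Int)) = true := by simp [pvFlagB]
      rw [hA, hB]
      apply pvQ_eq_cond _ _ _ _ _ hcl
      · intro hg
        rw [pv_cur_lt path L hp _ (by omega) (by omega),
          show ((path.length : Int) - 1).toNat = path.length - 1 by omega, hlast]
        simp
      · intro hg
        rw [pv_cur_lt path L hp _ (by omega) (by omega),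
          show ((path.length : Int) - 2).toNat = path.length - 2 by omega,
          hprev (by omega)]
        rw [show ((path.length : Int) - 2) = ((path.length - 2 : Nat) : Int) by omega,
          PySem.List.pyGetD_natCast]
      · exact pv_cur_ge path L hp _ (by omega)
      · exact pv_cur_ge path L hp _ (by omega)
    · by_cases hc2 : i = (path.length : Int) + 1
      · subst hc2
        have hA : pvFlagA path.length a true ((path.length : Int) + 1) = true := by
          unfold pvFlagA
          rw [if_neg (by omega), if_pos rfl]
        have hB : pvFlagB path.length a true ((path.length : Int) + 1) = false := by
          unfold pvFlagB
          rw [if_neg (by omega)]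
        rw [hA, hB]
        apply pvQ_eq_cond _ _ _ _ _ hcl
        · intro hg
          rw [show (path.length : Int) + 1 - 1 = (path.length : Int) by ring]
          rw [pv_cur_ge path L hp _ (le_refl _), if_neg (by simp)]
        · intro hg
          rw [show (path.length : Int) + 1 - 2 = (path.length : Int) - 1 by ring]
          rw [pv_cur_lt path L hp _ (by omega) (by omega),
            show ((path.length : Int) - 1).toNat = path.length - 1 by omega, hlast]
          simp
        · exact pv_cur_ge path L hp _ (by omega)
        · exact pv_cur_ge path L hp _ (by omega)
      · have hge : (path.length : Int) + 2 ≤ i := by omega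
        have hA : pvFlagA path.length a true i = false := by
          unfold pvFlagA
          rw [if_neg (by omega), if_neg (by omega)]
        have hB : pvFlagB path.length a true i = false := by
          unfold pvFlagB
          rw [if_neg (by omega)]
        rw [hA, hB]
        apply pvQ_eq_cond _ _ _ _ _ hcl
        · intro hg
          rw [if_neg (by simp), pv_cur_ge path L hp _ (by omega)]
        · intro hg
          rw [if_neg (by simp), pv_cur_ge path L hp _ (by omega)]
        · exact pv_cur_ge path L hp _ (by omega)
        · exact pv_cur_ge path L hp _ (by omega)

theorem pv_seat_shape (path L : List Int) (c : Int) (hp : path.length ≤ L.length)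
    (h1 : (path.length : Int) ≤ c) (h2 : c < (L.length : Int)) :
    seat_at_i path L c
      = path ++ (L.drop path.length).take (c.toNat - path.length) ++ [1] := by
  have hh : (0:Int) ≤ (path.length : Int) := by exact_mod_cast Nat.zero_le path.length
  have h0 : 0 ≤ c := by omega
  have htl : (L.drop path.length).length = L.length - path.length := by simp
  have hklt : c.toNat - path.length < (L.drop path.length).length := by omega
  have hdef : seat_at_i path L c
      = PySem.List.slice (PySem.List.pySetD (path ++ L.drop path.length) c 1) none (some (c + 1)) := rfl
  rw [hdef, PySem.List.pySetD_of_nonneg _ _ h0, PySem.List.slice_to _ (by omega)]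
  rw [show c.toNat = path.length + (c.toNat - path.length) by omega]
  rw [List.set_append, if_neg (by omega)]
  simp only [Nat.add_sub_cancel_left]
  rw [show (c + 1).toNat = path.length + ((c.toNat - path.length) + 1) by omega]
  rw [List.take_length_add_append]
  rw [List.set_eq_take_cons_drop _ hklt]
  rw [show (c.toNat - path.length) + 1
      = ((L.drop path.length).take (c.toNat - path.length)).length + 1 by
    rw [List.length_take]; omega]
  rw [List.take_length_add_append]
  simp

theorem pv_getD_getElem (L : List Int) (k : Nat) (hk : k < L.length) : L[k] = L.getD k 0 := by
  rw [List.getD_eq_getElem?_getD, List.getElem?_eq_getElem hk]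
  rfl

theorem pv_seat_facts (path L : List Int) (c : Int)
    (hp : path.length ≤ L.length)
    (hm1 : (path.length : Int) ≤ c) (hm2 : c < (L.length : Int))
    (hval0 : PySem.List.pyGetD L c 0 = 0) :
    (seat_at_i path L c).length = c.toNat + 1 ∧
    (seat_at_i path L c).getD ((seat_at_i path L c).length - 1) 0 = 1 ∧
    (2 ≤ (seat_at_i path L c).length →
      (seat_at_i path L c).getD ((seat_at_i path L c).length - 2) 0
        = (if c.toNat - 1 < path.length then path.getD (c.toNat - 1) 0
           else L.getD (c.toNat - 1) 0)) ∧
    (seat_at_i path L c).sum - (L.take (c.toNat + 1)).sum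
      = (path.sum - (L.take path.length).sum) + 1 := by
  have hh : (0:Int) ≤ (path.length : Int) := by exact_mod_cast Nat.zero_le path.length
  have h0 : 0 ≤ c := by omega
  have hsh := pv_seat_shape path L c hp hm1 hm2
  have hseglen : ((L.drop path.length).take (c.toNat - path.length)).length
      = c.toNat - path.length := by
    simp; omega
  have hlen : (seat_at_i path L c).length = c.toNat + 1 := by
    rw [hsh]; simp; omega
  have hvalN : L.getD c.toNat 0 = 0 := by
    rwa [show c = ((c.toNat : Nat) : Int) by omega, PySem.List.pyGetD_natCast] at hval0
  refine ⟨hlen, ?_, ?_, ?_⟩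
  · rw [hlen, hsh]
    rw [show c.toNat + 1 - 1
        = (path ++ (L.drop path.length).take (c.toNat - path.length)).length from by simp; omega]
    rw [List.getD_eq_getElem?_getD, List.getElem?_append_right (le_refl _)]
    simp
  · intro h2
    rw [hlen] at h2
    rw [hlen, hsh]
    have hXlen : (path ++ (L.drop path.length).take (c.toNat - path.length)).length = c.toNat := by
      simp; omega
    rw [show (c.toNat + 1) - 2 = c.toNat - 1 from by omega]
    rw [List.getD_eq_getElem?_getD]
    rw [List.getElem?_append_left (by rw [hXlen]; omega)]
    by_cases hcase : c.toNat - 1 < path.length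
    · rw [List.getElem?_append_left hcase, if_pos hcase]
      rw [List.getD_eq_getElem?_getD]
    · rw [List.getElem?_append_right (by omega), if_neg hcase]
      rw [List.getElem?_take_of_lt (by omega), List.getElem?_drop]
      rw [show path.length + (c.toNat - 1 - path.length) = c.toNat - 1 from by omega]
      rw [List.getElem?_eq_getElem (by omega), pv_getD_getElem L _ (by omega)]
      rfl
  · rw [hsh]
    have htake : L.take (c.toNat + 1)
        = L.take path.length ++ ((L.drop path.length).take (c.toNat - path.length)) ++ [(0:Int)] := by
      rw [show c.toNat + 1 = path.length + (c.toNat - path.length + 1) by omega, List.take_add]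
      rw [List.append_assoc]
      congr 1
      rw [List.take_succ]
      congr 1
      rw [List.getElem?_drop]
      rw [show path.length + (c.toNat - path.length) = c.toNat by omega]
      rw [List.getElem?_eq_getElem (by omega), pv_getD_getElem L _ (by omega), hvalN]
      rfl
    rw [htake]
    simp only [List.sum_append, List.sum_cons, List.sum_nil]
    omega

theorem pv_fold_max_shift (f : Int → Int → Int) (w : Int → Int) (V : Int) :
    ∀ (xs : List Int) (ans y : Int),
      (∀ x ∈ xs, ∀ acc, f acc x = max acc (V + w x)) →
      xs.foldl f (max ans (V + y))
        = max ans (V + xs.foldl (fun acc c => max acc (w c)) y) := by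
  intro xs
  induction xs with
  | nil => intro ans y _; rfl
  | cons x xs ih =>
    intro ans y hf
    rw [List.foldl_cons, List.foldl_cons, hf x (by simp) (max ans (V + y))]
    rw [show max (max ans (V + y)) (V + w x) = max ans (V + max y (w x)) from by omega]
    exact ih ans (max y (w x)) (fun z hz acc => hf z (by simp [hz]) acc)

theorem pv_backtrack_eq (L : List Int) :
    ∀ (fuel : Nat) (path : List Int) (a b : Bool) (ans : Int),
      pvInv L path a b → path.length ≤ L.length → L.length - path.length < fuel →
      backtrack L L.sum fuel path ans
        = max ans (path.sum - (L.take path.length).sum + pvG L path.length a b) := by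
  intro fuel
  induction fuel with
  | zero => intro path a b ans _ _ hf; exact absurd hf (Nat.not_lt_zero _)
  | succ fuel ih =>
    intro path a b ans hinv hp hf
    have hch := pv_choices_eq L path a b hinv hp
    by_cases h1 : path.length = L.length
    · have hGz : pvG L L.length a b = 0 := by rw [pvG]; simp
      simp only [backtrack, h1, if_true]
      rw [List.take_length, hGz]
      split_ifs <;> omega
    · by_cases h2 : find_choices path L = []
      · have hGz : pvG L path.length a b = 0 := by
          rw [pvG_max, ← hch, h2]
          rfl
        simp only [backtrack, h1, if_false, h2, if_true]
        have hsplit : (L.take path.length).sum + (L.drop path.length).sum = L.sum := by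
          rw [← List.sum_append, List.take_append_drop]
        simp only [List.sum_append]
        rw [hGz]
        split_ifs <;> omega
      · obtain ⟨c, rest, hc⟩ : ∃ c rest, find_choices path L = c :: rest := by
          rcases hfc : find_choices path L with _ | ⟨c, rest⟩
          · exact absurd hfc h2
          · exact ⟨c, rest, rfl⟩
        have hFc : pvF L path.length a b = c :: rest := by rw [← hch, hc]
        have hmemF : ∀ x ∈ c :: rest, (path.length : Int) ≤ x ∧ x < (L.length : Int)
            ∧ PySem.List.pyGetD L x 0 = 0 := by
          intro x hx; exact pvF_mem L path.length a b x (by rw [hFc]; exact hx)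
        have hh : (0:Int) ≤ (path.length : Int) := by exact_mod_cast Nat.zero_le path.length
        have hstep : ∀ x ∈ c :: rest, ∀ acc,
            backtrack L L.sum fuel (seat_at_i path L x) acc
              = max acc ((path.sum - (L.take path.length).sum)
                  + (1 + pvG L (x.toNat + 1) (decide (x = (path.length : Int)) && b) true)) := by
          intro x hx acc
          obtain ⟨hxp, hxn, hx0⟩ := hmemF x hx
          obtain ⟨hlen', hE1, hE2, hsum'⟩ := pv_seat_facts path L x hp hxp hxn hx0
          have hinv' : pvInv L (seat_at_i path L x)
              (decide (x = (path.length : Int)) && b) true := by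
            right
            refine ⟨by intro hnil; rw [hnil] at hlen'; simp at hlen', rfl, hE1, ?_⟩
            intro h2'
            rw [hE2 h2', hlen']
            rw [show x.toNat + 1 - 2 = x.toNat - 1 from by omega]
            rw [hlen'] at h2'
            by_cases hcase : x.toNat - 1 < path.length
            · have hxeq : x = (path.length : Int) := by omega
              have hb : b = true := by
                rcases hinv with ⟨hpe, _, _⟩ | ⟨_, hb, _, _⟩
                · exfalso; rw [hpe] at hcase; simp at hcase
                · exact hb
              have hlast : path.getD (path.length - 1) 0 = 1 := by
                rcases hinv with ⟨hpe, _, _⟩ | ⟨_, _, hl, _⟩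
                · exfalso; rw [hpe] at hcase; simp at hcase
                · exact hl
              rw [if_pos hcase, if_pos (by rw [hxeq, hb]; simp)]
              rw [show x.toNat - 1 = path.length - 1 from by omega]
              exact hlast
            · have hxne : ¬ (x = (path.length : Int)) := by omega
              rw [if_neg hcase, if_neg (by simp [hxne])]
          rw [ih (seat_at_i path L x) _ true acc hinv' (by rw [hlen']; omega)
            (by rw [hlen']; omega)]
          rw [hlen', hsum']
          congr 1
          omega
        simp only [backtrack, h1, if_false, hc]
        rw [if_neg (by simp : ¬ (c :: rest = ([] : List Int)))]
        rw [List.foldl_cons]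
        rw [hstep c (by simp) ans]
        have hw1 : ∀ x, 0 ≤ 1 + pvG L (x.toNat + 1) (decide (x = (path.length : Int)) && b) true := by
          intro x; have := pvG_nonneg L (x.toNat + 1) (decide (x = (path.length : Int)) && b) true
          omega
        rw [pv_fold_max_shift _ _ _ rest ans _
          (fun x hx acc => hstep x (by simp [hx]) acc)]
        rw [pvG_max L path.length a b, hFc, List.foldl_cons]
        congr 2
        rw [show max 0 (1 + pvG L (((c : Int)).toNat + 1) (decide (c = (path.length : Int)) && b) true)
            = 1 + pvG L (c.toNat + 1) (decide (c = (path.length : Int)) && b) true from by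
          have := hw1 c; omega]

theorem pv_main_A (L : List Int) : maximum_seating L = pvG L 0 false false := by
  have hA := pv_backtrack_eq L (L.length + 1) [] false false 0 (Or.inl ⟨rfl, rfl, rfl⟩)
    (by simp) (by simp)
  have hmain : maximum_seating L = max 0 (pvG L 0 false false) := by
    unfold maximum_seating
    simpa using hA
  rw [hmain, max_eq_right (pvG_nonneg L 0 false false)]

theorem pvB_feas (L : List Int) (i : Int) (a b : Bool) :
    pvFeas L i a b = pvCond L i a b := by
  unfold pvFeas
  by_cases h : PySem.List.pyGetD L i 0 ≠ 0
  · rw [if_pos h]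
    unfold pvCond
    simp only [ne_eq, Decidable.not_not] at h ⊢
    simp [h]
  · rw [if_neg h]
    simp only [ne_eq, Decidable.not_not] at h
    have e : (let s : Int := 0
        let s := if i - 1 ≥ 0 then s + (if b then 1 else PySem.List.pyGetD L (i - 1) 0) else s
        let s := if i - 2 ≥ 0 then s + (if a then 1 else PySem.List.pyGetD L (i - 2) 0) else s
        let s := if i + 1 < (L.length : Int) then s + PySem.List.pyGetD L (i + 1) 0 else s
        let s := if i + 2 < (L.length : Int) then s + PySem.List.pyGetD L (i + 2) 0 else s
        s) = pvS L i a b := by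
      unfold pvS
      split_ifs <;> ring
    have e2 : (let s : Int := 0
        let s := if i - 1 ≥ 0 then s + (if b then 1 else PySem.List.pyGetD L (i - 1) 0) else s
        let s := if i - 2 ≥ 0 then s + (if a then 1 else PySem.List.pyGetD L (i - 2) 0) else s
        let s := if i + 1 < (L.length : Int) then s + PySem.List.pyGetD L (i + 1) 0 else s
        let s := if i + 2 < (L.length : Int) then s + PySem.List.pyGetD L (i + 2) 0 else s
        s == 0) = (pvS L i a b == 0) := by
      rw [show (let s : Int := 0
        let s := if i - 1 ≥ 0 then s + (if b then 1 else PySem.List.pyGetD L (i - 1) 0) else s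
        let s := if i - 2 ≥ 0 then s + (if a then 1 else PySem.List.pyGetD L (i - 2) 0) else s
        let s := if i + 1 < (L.length : Int) then s + PySem.List.pyGetD L (i + 1) 0 else s
        let s := if i + 2 < (L.length : Int) then s + PySem.List.pyGetD L (i + 2) 0 else s
        s == 0) = ((let s : Int := 0
        let s := if i - 1 ≥ 0 then s + (if b then 1 else PySem.List.pyGetD L (i - 1) 0) else s
        let s := if i - 2 ≥ 0 then s + (if a then 1 else PySem.List.pyGetD L (i - 2) 0) else s
        let s := if i + 1 < (L.length : Int) then s + PySem.List.pyGetD L (i + 1) 0 else s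
        let s := if i + 2 < (L.length : Int) then s + PySem.List.pyGetD L (i + 2) 0 else s
        s) == 0) from rfl, e]
    rw [e2]
    unfold pvCond
    simp [h]

theorem pvB_loop (L : List Int) : ∀ (p : Nat), p ≤ L.length →
    (PySem.List.pyRange ((p : Int) - 1) (-1) (-1)).foldl (pvBStep L)
      (pvG L p false false, pvG L p false true, pvG L p true false, pvG L p true true)
      = (pvG L 0 false false, pvG L 0 false true, pvG L 0 true false, pvG L 0 true true) := by
  intro p
  induction p with
  | zero =>
    intro _
    rw [show ((0 : Nat) : Int) - 1 = (-1 : Int) by simp,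
      PySem.List.pyRange_neg_one_eq_nil (le_refl _)]
    rfl
  | succ p ih =>
    intro hp
    rw [show (((p + 1 : Nat)) : Int) - 1 = (p : Int) from by push_cast; ring]
    rw [PySem.List.pyRange_neg_one_cons (by omega)]
    rw [List.foldl_cons]
    have hred : pvBStep L
        (pvG L (p + 1) false false, pvG L (p + 1) false true, pvG L (p + 1) true false, pvG L (p + 1) true true)
        ((p : Int))
        = (pvG L p false false, pvG L p false true, pvG L p true false, pvG L p true true) := by
      have hG : ∀ (a b : Bool), pvG L p a b
          = if pvCond L (p : Int) a b
            then max (1 + pvG L (p + 1) b true) (pvG L (p + 1) b false)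
            else pvG L (p + 1) b false := by
        intro a b; rw [pvG]; simp [Nat.lt_of_lt_of_le (Nat.lt_succ_self p) hp]
      have hstep0 : pvBStep L
          (pvG L (p + 1) false false, pvG L (p + 1) false true, pvG L (p + 1) true false, pvG L (p + 1) true true)
          ((p : Int))
          = ((if pvFeas L ((p : Int)) false false
              then max (pvG L (p + 1) false false) (1 + pvG L (p + 1) false true)
              else pvG L (p + 1) false false),
             (if pvFeas L ((p : Int)) false true
              then max (pvG L (p + 1) true false) (1 + pvG L (p + 1) true true)
              else pvG L (p + 1) true false),
             (if pvFeas L ((p : Int)) true false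
              then max (pvG L (p + 1) false false) (1 + pvG L (p + 1) false true)
              else pvG L (p + 1) false false),
             (if pvFeas L ((p : Int)) true true
              then max (pvG L (p + 1) true false) (1 + pvG L (p + 1) true true)
              else pvG L (p + 1) true false)) := rfl
      rw [hstep0, pvB_feas L ((p : Int)) false false, pvB_feas L ((p : Int)) false true,
        pvB_feas L ((p : Int)) true false, pvB_feas L ((p : Int)) true true]
      rw [hG false false, hG false true, hG true false, hG true true]
      refine Prod.ext ?_ (Prod.ext ?_ (Prod.ext ?_ ?_)) <;> simp <;> split_ifs <;> omega
    rw [hred]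
    exact ih (by omega)

theorem pv_alt_eq (L : List Int) : maximum_seating_alt L = pvG L 0 false false := by
  have hz : ∀ (a b : Bool), pvG L L.length a b = 0 := by
    intro a b; rw [pvG]; simp
  have h0 : maximum_seating_alt L
      = ((PySem.List.pyRange ((L.length : Int) - 1) (-1) (-1)).foldl (pvBStep L)
          ((0 : Int), (0 : Int), (0 : Int), (0 : Int))).1 := rfl
  rw [h0]
  rw [show ((0:Int),(0:Int),(0:Int),(0:Int))
      = (pvG L L.length false false, pvG L L.length false true,
         pvG L L.length true false, pvG L L.length true true) from by
    rw [hz, hz, hz, hz]]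
  rw [pvB_loop L L.length (le_refl _)]

theorem pv_final (L : List Int) : maximum_seating L = maximum_seating_alt L := by
  rw [pv_main_A, pv_alt_eq]

-- ===== VERDICT (by name: the statement is the Claim_ definition above) =====
theorem maximum_seating_spec : Claim_equal_maximum_seating := by
  intro L _hdom
  unfold Spec_maximum_seating
  exact pv_final L
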